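-- pv_equiv track=rewrite | github.com/Xinrihui/Data-Structure-and-Algrithms | 06_bsearch/bsearch_xrh.py | besearch_last_equal
-- ===== SOURCE A (Python) =====
-- def besearch_last_equal(nums,target):
--     """
--     查找最后一个值等于给定值的元素
--     :param nums: [1,3,4,5,6,8,8,8,11,18]
--     :param target: 8
--     :return: 7
--     """
--     left=0
--     right=len(nums)-1
--
--     while left<=right:
--
--         mid= left+(right-left)//2 #防止 left+right 过大溢出
--
--         if nums[mid]==target:
--             #往右边找
--             if mid== len(nums)-1 or (mid+1<=len(nums)-1 and nums[mid+1]!=target):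
--                 return mid
--             else:
--                 while mid<=len(nums)-1 and nums[mid]==target:
--                     mid+=1
--                 return mid-1
--
--
--         elif target>nums[mid]:
--             left=mid+1
--
--         elif target<nums[mid]:
--             right=mid-1
--
--     return None
-- ===== SOURCE B (Python) =====
-- def besearch_last_equal(nums, target):
--     left, right = 0, len(nums) - 1
--     ans = None
--     while left <= right:
--         mid = (left + right) // 2
--         if nums[mid] <= target:
--             if nums[mid] == target:
--                 ans = mid
--             left = mid + 1
--         else:
--             right = mid - 1
--     return ans
-- ===== Notes on version B (the rewrite author's own statement) =====
-- stated objective: alternative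
-- what changed: A binary-searches and, on a hit, falls back to a linear rightward scan through the run of duplicates (O(n) worst case); B is a single pure binary search that records the match and keeps searching the right half, never scanning linearly.
-- outside the precondition, e.g. on besearch_last_equal([1, 1, 0, 1], 1): A returns 1, B returns 3
import Mathlib
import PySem

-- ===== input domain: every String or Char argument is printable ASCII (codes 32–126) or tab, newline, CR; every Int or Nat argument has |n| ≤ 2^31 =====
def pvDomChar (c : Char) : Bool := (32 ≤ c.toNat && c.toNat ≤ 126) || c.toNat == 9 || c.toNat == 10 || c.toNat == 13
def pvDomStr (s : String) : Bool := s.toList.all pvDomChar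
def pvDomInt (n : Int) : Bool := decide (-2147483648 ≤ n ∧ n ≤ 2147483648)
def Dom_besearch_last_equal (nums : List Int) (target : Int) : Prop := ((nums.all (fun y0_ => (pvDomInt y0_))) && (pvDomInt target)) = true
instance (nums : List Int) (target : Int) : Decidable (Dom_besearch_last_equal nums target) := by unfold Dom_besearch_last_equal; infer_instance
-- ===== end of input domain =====

-- B replaces A's binary search + linear duplicate-run scan by a pure binary search that
-- records the match and keeps searching the right half (objective: alternative algorithm;
-- A's inner scan is linear in the run of duplicates, B never scans linearly).


-- ===== PORT A =====
-- inner 'while mid<=len(nums)-1 and nums[mid]==target: mid+=1 ; return mid-1'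
def aScan (nums : List Int) (target : Int) (mid : Int) : Int :=
  if _h : mid ≤ (nums.length : Int) - 1 ∧ PySem.List.pyGetD nums mid 0 = target then
    aScan nums target (mid + 1)
  else
    mid - 1
termination_by ((nums.length : Int) - mid).toNat
decreasing_by omega

-- outer 'while left<=right' loop of A (pyGetD: index provably in range wherever evaluated)
def aLoop (nums : List Int) (target : Int) (left right : Int) : Option Int :=
  if _h : left ≤ right then
    let mid := left + PySem.Int.floordiv (right - left) 2
    if PySem.List.pyGetD nums mid 0 = target then
      if mid = (nums.length : Int) - 1 ∨
         (mid + 1 ≤ (nums.length : Int) - 1 ∧ PySem.List.pyGetD nums (mid + 1) 0 ≠ target) then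
        some mid
      else
        some (aScan nums target mid)
    else if target > PySem.List.pyGetD nums mid 0 then
      aLoop nums target (mid + 1) right
    else
      aLoop nums target left (mid - 1)
  else
    none
termination_by (right + 1 - left).toNat
decreasing_by
  all_goals
    have hfd : PySem.Int.floordiv (right - left) 2 = (right - left) / 2 :=
      PySem.Int.floordiv_eq_ediv_of_pos (by omega)
    omega

def besearch_last_equal (nums : List Int) (target : Int) : Option Int :=
  aLoop nums target 0 ((nums.length : Int) - 1)

-- ===== PORT B =====
-- single binary search recording the last match and continuing right
def bLoop (nums : List Int) (target : Int) (left right : Int) (ans : Option Int) : Option Int :=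
  if _h : left ≤ right then
    let mid := PySem.Int.floordiv (left + right) 2
    if PySem.List.pyGetD nums mid 0 ≤ target then
      bLoop nums target (mid + 1) right
        (if PySem.List.pyGetD nums mid 0 = target then some mid else ans)
    else
      bLoop nums target left (mid - 1) ans
  else
    ans
termination_by (right + 1 - left).toNat
decreasing_by
  all_goals
    have hfd := PySem.Int.floordiv_two_mid_bounds (lo := left) (hi := right) (by omega)
    omega

def besearch_last_equal_alt (nums : List Int) (target : Int) : Option Int :=
  bLoop nums target 0 ((nums.length : Int) - 1) none

-- ===== PRECONDITION & SPEC =====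
-- Pre_ excludes unsorted lists that contain the target: both programs are binary searches, so on
-- unsorted input containing the target the returned value is an accident of the probe path (A and B
-- return ordinary but different values there); when the target is absent both return none on any list.
def Pre_besearch_last_equal (nums : List Int) (target : Int) : Prop :=
  List.Pairwise (· ≤ ·) nums ∨ target ∉ nums
instance (nums : List Int) (target : Int) : Decidable (Pre_besearch_last_equal nums target) := by
  unfold Pre_besearch_last_equal; infer_instance

def pvWitness_besearch_last_equal : List Int × Int := ([1, 3, 4, 5, 6, 8, 8, 8, 11, 18], 8)

def Spec_besearch_last_equal (nums : List Int) (target : Int) (out : Option Int) : Prop := out = besearch_last_equal_alt nums target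
instance (nums : List Int) (target : Int) (out : Option Int) : Decidable (Spec_besearch_last_equal nums target out) := by unfold Spec_besearch_last_equal; infer_instance

-- ===== CLAIM (what is proved, stated in full; the proofs are below) =====
def Claim_equal_besearch_last_equal : Prop := ∀ (nums : List Int) (target : Int), Dom_besearch_last_equal nums target → Pre_besearch_last_equal nums target → Spec_besearch_last_equal nums target (besearch_last_equal nums target)

-- ===== LEMMAS AND PROOFS =====

-- proof-side specifications
-- j is the index of the LAST occurrence of t
def pvIsLast (nums : List Int) (t : Int) (j : Int) : Prop :=
  0 ≤ j ∧ j < (nums.length : Int) ∧ PySem.List.pyGetD nums j 0 = t ∧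
    ∀ k : Int, j < k → k < (nums.length : Int) → PySem.List.pyGetD nums k 0 ≠ t

def pvNoOcc (nums : List Int) (t : Int) : Prop :=
  ∀ k : Int, 0 ≤ k → k < (nums.length : Int) → PySem.List.pyGetD nums k 0 ≠ t

def pvResSpec (nums : List Int) (t : Int) (r : Option Int) : Prop :=
  (r = none ∧ pvNoOcc nums t) ∨ ∃ j, r = some j ∧ pvIsLast nums t j

lemma pvMono {nums : List Int} (hs : List.Pairwise (· ≤ ·) nums) {i j : Int}
    (h0 : 0 ≤ i) (hij : i ≤ j) (hj : j < (nums.length : Int)) :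
    PySem.List.pyGetD nums i 0 ≤ PySem.List.pyGetD nums j 0 := by
  rw [PySem.List.pyGetD_eq_getElem nums 0 h0 (by omega), PySem.List.pyGetD_eq_getElem nums 0 (by omega) hj]
  rcases eq_or_lt_of_le hij with h | h
  · simp [h]
  · exact (List.pairwise_iff_getElem.mp hs) i.toNat j.toNat (by omega) (by omega) (by omega)

lemma pvIsLast_unique {nums : List Int} {t j j' : Int}
    (h1 : pvIsLast nums t j) (h2 : pvIsLast nums t j') : j = j' := by
  obtain ⟨h10, h1l, h1e, h1a⟩ := h1
  obtain ⟨h20, h2l, h2e, h2a⟩ := h2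
  by_contra hne
  rcases lt_or_gt_of_ne hne with h | h
  · exact h1a j' h h2l h2e
  · exact h2a j h h1l h1e

lemma pvResSpec_unique {nums : List Int} {t : Int} {r r' : Option Int}
    (h1 : pvResSpec nums t r) (h2 : pvResSpec nums t r') : r = r' := by
  rcases h1 with ⟨he, hn⟩ | ⟨j, he, hl⟩ <;> rcases h2 with ⟨he', hn'⟩ | ⟨j', he', hl'⟩
  · rw [he, he']
  · exact absurd hl'.2.2.1 (hn j' hl'.1 hl'.2.1)
  · exact absurd hl.2.2.1 (hn' j hl.1 hl.2.1)
  · rw [he, he', pvIsLast_unique hl hl']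

lemma aScan_isLast {nums : List Int} {t : Int} (hs : List.Pairwise (· ≤ ·) nums) :
    ∀ (n : Nat) (mid : Int), ((nums.length : Int) - mid).toNat = n →
      0 ≤ mid → mid < (nums.length : Int) → PySem.List.pyGetD nums mid 0 = t →
      pvIsLast nums t (aScan nums t mid) := by
  intro n
  induction n using Nat.strong_induction_on with
  | _ n ih =>
    intro mid hn h0 hlt heq
    rw [aScan, dif_pos (And.intro (by omega) heq)]
    by_cases hnext : mid + 1 < (nums.length : Int) ∧ PySem.List.pyGetD nums (mid + 1) 0 = t
    · exact ih (((nums.length : Int) - (mid + 1)).toNat) (by omega) (mid + 1) rfl (by omega)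
        hnext.1 hnext.2
    · rw [aScan, dif_neg (fun hc => hnext ⟨by omega, hc.2⟩)]
      refine ⟨by omega, by omega, by simpa using heq, ?_⟩
      intro k hk hklen
      have hlen : mid + 1 < (nums.length : Int) := by omega
      have hne : PySem.List.pyGetD nums (mid + 1) 0 ≠ t := fun hc => hnext ⟨hlen, hc⟩
      have h1 : t ≤ PySem.List.pyGetD nums (mid + 1) 0 := heq ▸ pvMono hs h0 (by omega) hlen
      have h2 : PySem.List.pyGetD nums (mid + 1) 0 ≤ PySem.List.pyGetD nums k 0 := pvMono hs (by omega) (by omega) hklen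
      omega

lemma aLoop_spec {nums : List Int} {t : Int} (hs : List.Pairwise (· ≤ ·) nums) :
    ∀ (n : Nat) (left right : Int), (right + 1 - left).toNat = n →
      0 ≤ left → right ≤ (nums.length : Int) - 1 →
      (∀ k : Int, 0 ≤ k → k < left → PySem.List.pyGetD nums k 0 < t) →
      (∀ k : Int, right < k → k < (nums.length : Int) → t < PySem.List.pyGetD nums k 0) →
      pvResSpec nums t (aLoop nums t left right) := by
  intro n
  induction n using Nat.strong_induction_on with
  | _ n ih =>
    intro left right hn h0 hr hL hR
    by_cases hlr : left ≤ right
    · rw [aLoop, dif_pos hlr]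
      have hfd : PySem.Int.floordiv (right - left) 2 = (right - left) / 2 :=
        PySem.Int.floordiv_eq_ediv_of_pos (by omega)
      set mid := left + PySem.Int.floordiv (right - left) 2 with hmid
      have hmb : left ≤ mid ∧ mid ≤ right := by constructor <;> omega
      have hmlen : mid < (nums.length : Int) := by omega
      by_cases heq : PySem.List.pyGetD nums mid 0 = t
      · rw [if_pos heq]
        by_cases hg : mid = (nums.length : Int) - 1 ∨
            (mid + 1 ≤ (nums.length : Int) - 1 ∧ PySem.List.pyGetD nums (mid + 1) 0 ≠ t)
        · rw [if_pos hg]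
          refine Or.inr ⟨mid, rfl, by omega, hmlen, heq, ?_⟩
          intro k hk hklen
          rcases hg with hg | ⟨hg1, hg2⟩
          · omega
          · have h1 : t ≤ PySem.List.pyGetD nums (mid + 1) 0 := heq ▸ pvMono hs (by omega) (by omega) (by omega)
            have h2 : PySem.List.pyGetD nums (mid + 1) 0 ≤ PySem.List.pyGetD nums k 0 := pvMono hs (by omega) (by omega) hklen
            have hne : PySem.List.pyGetD nums (mid + 1) 0 ≠ t := hg2
            omega
        · rw [if_neg hg]
          exact Or.inr ⟨aScan nums t mid, rfl,
            aScan_isLast hs (((nums.length : Int) - mid).toNat) mid rfl (by omega) hmlen heq⟩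
      · rw [if_neg heq]
        by_cases hgt : t > PySem.List.pyGetD nums mid 0
        · rw [if_pos hgt]
          refine ih ((right + 1 - (mid + 1)).toNat) (by omega) (mid + 1) right rfl (by omega) hr
            ?_ hR
          intro k hk0 hk
          have h2 : PySem.List.pyGetD nums k 0 ≤ PySem.List.pyGetD nums mid 0 := pvMono hs hk0 (by omega) hmlen
          have : PySem.List.pyGetD nums mid 0 < t := hgt
          omega
        · rw [if_neg hgt]
          refine ih ((mid - 1 + 1 - left).toNat) (by omega) left (mid - 1) rfl h0 (by omega) hL ?_
          intro k hk hklen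
          have h2 : PySem.List.pyGetD nums mid 0 ≤ PySem.List.pyGetD nums k 0 := pvMono hs (by omega) (by omega) hklen
          have : t < PySem.List.pyGetD nums mid 0 := by
            have := lt_trichotomy t (PySem.List.pyGetD nums mid 0)
            have h1 : ¬ t = PySem.List.pyGetD nums mid 0 := fun hc => heq hc.symm
            have h3 : ¬ PySem.List.pyGetD nums mid 0 < t := fun hc => hgt hc
            omega
          omega
    · rw [aLoop, dif_neg hlr]
      refine Or.inl ⟨rfl, ?_⟩
      intro k hk0 hklen
      by_cases hkl : k < left
      · exact fun hc => absurd hc (by have := hL k hk0 hkl; omega)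
      · exact fun hc => absurd hc (by have := hR k (by omega) hklen; omega)

-- ans is exactly the last occurrence among indices < left
def pvAnsSpec (nums : List Int) (t left : Int) (ans : Option Int) : Prop :=
  (ans = none ∧ ∀ k : Int, 0 ≤ k → k < left → PySem.List.pyGetD nums k 0 ≠ t) ∨
  (∃ j, ans = some j ∧ 0 ≤ j ∧ j < left ∧ PySem.List.pyGetD nums j 0 = t ∧
    ∀ k : Int, j < k → k < left → PySem.List.pyGetD nums k 0 ≠ t)

lemma bLoop_spec {nums : List Int} {t : Int} (hs : List.Pairwise (· ≤ ·) nums) :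
    ∀ (n : Nat) (left right : Int) (ans : Option Int), (right + 1 - left).toNat = n →
      0 ≤ left → left ≤ (nums.length : Int) → right ≤ (nums.length : Int) - 1 →
      (∀ k : Int, 0 ≤ k → k < left → PySem.List.pyGetD nums k 0 ≤ t) →
      (∀ k : Int, right < k → k < (nums.length : Int) → t < PySem.List.pyGetD nums k 0) →
      pvAnsSpec nums t left ans →
      pvResSpec nums t (bLoop nums t left right ans) := by
  intro n
  induction n using Nat.strong_induction_on with
  | _ n ih =>
    intro left right ans hn h0 hlen0 hr hL hR hans
    by_cases hlr : left ≤ right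
    · rw [bLoop, dif_pos hlr]
      have hmb := PySem.Int.floordiv_two_mid_bounds (lo := left) (hi := right) hlr
      set mid := PySem.Int.floordiv (left + right) 2 with hmid
      have hmlen : mid < (nums.length : Int) := by omega
      by_cases hle : PySem.List.pyGetD nums mid 0 ≤ t
      · rw [if_pos hle]
        refine ih ((right + 1 - (mid + 1)).toNat) (by omega) (mid + 1) right _ rfl (by omega)
          (by omega) hr ?_ hR ?_
        · intro k hk0 hk
          have h2 : PySem.List.pyGetD nums k 0 ≤ PySem.List.pyGetD nums mid 0 := pvMono hs hk0 (by omega) hmlen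
          have : PySem.List.pyGetD nums mid 0 ≤ t := hle
          omega
        · by_cases heq : PySem.List.pyGetD nums mid 0 = t
          · rw [if_pos heq]
            exact Or.inr ⟨mid, rfl, by omega, by omega, heq, fun k hk hk' => by omega⟩
          · rw [if_neg heq]
            have hlt : PySem.List.pyGetD nums mid 0 < t := by
              have h1 : PySem.List.pyGetD nums mid 0 ≤ t := hle
              have h2 : PySem.List.pyGetD nums mid 0 ≠ t := heq
              omega
            have hext : ∀ k : Int, left ≤ k → k < mid + 1 → PySem.List.pyGetD nums k 0 ≠ t := by
              intro k hk hk'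
              have h2 : PySem.List.pyGetD nums k 0 ≤ PySem.List.pyGetD nums mid 0 := pvMono hs (by omega) (by omega) hmlen
              omega
            rcases hans with ⟨he, hnone⟩ | ⟨j, he, hj0, hjl, hje, hja⟩
            · refine Or.inl ⟨he, ?_⟩
              intro k hk0 hk
              by_cases hkl : k < left
              · exact hnone k hk0 hkl
              · exact hext k (by omega) hk
            · refine Or.inr ⟨j, he, hj0, by omega, hje, ?_⟩
              intro k hk hk'
              by_cases hkl : k < left
              · exact hja k hk hkl
              · exact hext k (by omega) hk'
      · rw [if_neg hle]
        refine ih ((mid - 1 + 1 - left).toNat) (by omega) left (mid - 1) ans rfl h0 hlen0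
          (by omega) hL ?_ hans
        intro k hk hklen
        have h2 : PySem.List.pyGetD nums mid 0 ≤ PySem.List.pyGetD nums k 0 := pvMono hs (by omega) (by omega) hklen
        have : t < PySem.List.pyGetD nums mid 0 := by
          have h1 : ¬ PySem.List.pyGetD nums mid 0 ≤ t := hle
          omega
        omega
    · rw [bLoop, dif_neg hlr]
      rcases hans with ⟨he, hnone⟩ | ⟨j, he, hj0, hjl, hje, hja⟩
      · refine Or.inl ⟨he, ?_⟩
        intro k hk0 hklen
        by_cases hkl : k < left
        · exact hnone k hk0 hkl
        · exact fun hc => absurd hc (by have := hR k (by omega) hklen; omega)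
      · refine Or.inr ⟨j, he, hj0, by omega, hje, ?_⟩
        intro k hk hklen
        by_cases hkl : k < left
        · exact hja k hk hkl
        · exact fun hc => absurd hc (by have := hR k (by omega) hklen; omega)

lemma aLoop_notMem {nums : List Int} {t : Int} (hmem : t ∉ nums) :
    ∀ (n : Nat) (left right : Int), (right + 1 - left).toNat = n →
      0 ≤ left → right ≤ (nums.length : Int) - 1 →
      aLoop nums t left right = none := by
  intro n
  induction n using Nat.strong_induction_on with
  | _ n ih =>
    intro left right hn h0 hr
    by_cases hlr : left ≤ right
    · rw [aLoop, dif_pos hlr]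
      have hfd : PySem.Int.floordiv (right - left) 2 = (right - left) / 2 :=
        PySem.Int.floordiv_eq_ediv_of_pos (by omega)
      set mid := left + PySem.Int.floordiv (right - left) 2 with hmid
      have heq : PySem.List.pyGetD nums mid 0 ≠ t := by
        intro hc
        exact hmem (hc ▸ PySem.List.pyGetD_mem nums 0 (by constructor <;> omega))
      rw [if_neg heq]
      by_cases hgt : t > PySem.List.pyGetD nums mid 0
      · rw [if_pos hgt]
        exact ih ((right + 1 - (mid + 1)).toNat) (by omega) (mid + 1) right rfl (by omega) hr
      · rw [if_neg hgt]
        exact ih ((mid - 1 + 1 - left).toNat) (by omega) left (mid - 1) rfl h0 (by omega)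
    · rw [aLoop, dif_neg hlr]

lemma bLoop_notMem {nums : List Int} {t : Int} (hmem : t ∉ nums) :
    ∀ (n : Nat) (left right : Int), (right + 1 - left).toNat = n →
      0 ≤ left → right ≤ (nums.length : Int) - 1 →
      bLoop nums t left right none = none := by
  intro n
  induction n using Nat.strong_induction_on with
  | _ n ih =>
    intro left right hn h0 hr
    by_cases hlr : left ≤ right
    · rw [bLoop, dif_pos hlr]
      have hmb := PySem.Int.floordiv_two_mid_bounds (lo := left) (hi := right) hlr
      set mid := PySem.Int.floordiv (left + right) 2 with hmid
      have heq : PySem.List.pyGetD nums mid 0 ≠ t := by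
        intro hc
        exact hmem (hc ▸ PySem.List.pyGetD_mem nums 0 (by constructor <;> omega))
      by_cases hle : PySem.List.pyGetD nums mid 0 ≤ t
      · rw [if_pos hle, if_neg heq]
        exact ih ((right + 1 - (mid + 1)).toNat) (by omega) (mid + 1) right rfl (by omega) hr
      · rw [if_neg hle]
        exact ih ((mid - 1 + 1 - left).toNat) (by omega) left (mid - 1) rfl h0 (by omega)
    · rw [bLoop, dif_neg hlr]

-- ===== VERDICT (by name: the statement is the Claim_ definition above) =====
theorem besearch_last_equal_spec : Claim_equal_besearch_last_equal := by
  intro nums target _hdom hpre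
  unfold Spec_besearch_last_equal besearch_last_equal besearch_last_equal_alt
  rcases hpre with hs | hmem
  case inr =>
    rw [aLoop_notMem hmem _ 0 ((nums.length : Int) - 1) rfl (by omega) (by omega),
        bLoop_notMem hmem _ 0 ((nums.length : Int) - 1) rfl (by omega) (by omega)]
  case inl =>
    have hA : pvResSpec nums target (aLoop nums target 0 ((nums.length : Int) - 1)) :=
      aLoop_spec hs _ 0 ((nums.length : Int) - 1) rfl (by omega) (by omega)
        (fun k hk0 hk => by omega) (fun k hk hklen => by omega)
    have hB : pvResSpec nums target (bLoop nums target 0 ((nums.length : Int) - 1) none) :=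
      bLoop_spec hs _ 0 ((nums.length : Int) - 1) none rfl (by omega) (by omega) (by omega)
        (fun k hk0 hk => by omega) (fun k hk hklen => by omega)
        (Or.inl ⟨rfl, fun k hk0 hk => by omega⟩)
    exact pvResSpec_unique hA hB
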